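-- pv_equiv track=rewrite | github.com/algorithmFor2021/GeunHo_LEE | 2143.py | part_sum
-- ===== SOURCE A (Python) =====
-- def part_sum(lst):
--     tmp = dict()
--     for j in range(len(lst)):
--         total = 0
--         for i in range(j, len(lst)):
--             total += lst[i]
--             if total in tmp.keys():
--                 cnt = tmp[total]
--                 tmp[total] = cnt + 1
--             else:
--                 tmp[total] = 1
--
--     return tmp
-- ===== SOURCE B (Python) =====
-- def part_sum(lst):
--     n = len(lst)
--     prefix = [0]
--     acc = 0
--     for x in lst:
--         acc += x
--         prefix.append(acc)
--     tmp = dict()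
--     for a in range(n):
--         for b in range(a + 1, n + 1):
--             s = prefix[b] - prefix[a]
--             tmp[s] = tmp.get(s, 0) + 1
--     return tmp
-- ===== Notes on version B (the rewrite author's own statement) =====
-- stated objective: alternative
-- what changed: B precomputes a prefix-sum table once and produces every contiguous subarray sum as a subtraction prefix[b]-prefix[a] over index pairs, instead of A's per-start-index running-total accumulation with an if/else membership update.
import Mathlib
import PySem

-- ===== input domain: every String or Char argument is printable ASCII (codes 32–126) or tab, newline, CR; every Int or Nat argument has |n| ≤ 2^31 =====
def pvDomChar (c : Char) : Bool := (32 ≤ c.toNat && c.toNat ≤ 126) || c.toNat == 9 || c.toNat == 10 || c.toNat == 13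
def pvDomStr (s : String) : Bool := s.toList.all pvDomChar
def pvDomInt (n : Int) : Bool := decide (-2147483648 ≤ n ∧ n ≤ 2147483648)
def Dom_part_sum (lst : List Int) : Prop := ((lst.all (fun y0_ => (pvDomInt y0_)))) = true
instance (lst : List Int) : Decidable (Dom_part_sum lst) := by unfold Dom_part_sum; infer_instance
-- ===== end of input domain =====

-- B replaces A's per-start running-total accumulation by a precomputed prefix-sum table,
-- obtaining each contiguous-subarray sum by subtraction (objective: alternative decomposition, same cost).

-- ===== PORT A =====

def part_sum (lst : List Int) : List (Int × Int) :=
  let tmp : PySem.Dict Int Int :=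
    (PySem.List.pyRange 0 (PySem.List.len lst) 1).foldl (fun tmp j =>
      ((PySem.List.pyRange j (PySem.List.len lst) 1).foldl
        (fun (st : Int × PySem.Dict Int Int) i =>
          let total := st.1 + PySem.List.pyGetD lst i 0
          let tmp := st.2
          (total,
            if tmp.contains total then tmp.insert total (tmp.getD total 0 + 1)
            else tmp.insert total 1))
        ((0 : Int), tmp)).2)
      PySem.Dict.empty
  tmp.items

-- ===== PORT B =====
def part_sum_alt (lst : List Int) : List (Int × Int) :=
  let n : Int := PySem.List.len lst
  let prefix_ : List Int :=
    (lst.foldl (fun (st : Int × List Int) x => (st.1 + x, st.2 ++ [st.1 + x]))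
      ((0 : Int), ([0] : List Int))).2
  let tmp : PySem.Dict Int Int :=
    (PySem.List.pyRange 0 n 1).foldl (fun tmp a =>
      (PySem.List.pyRange (a + 1) (n + 1) 1).foldl (fun tmp b =>
        let s := PySem.List.pyGetD prefix_ b 0 - PySem.List.pyGetD prefix_ a 0
        tmp.insert s (tmp.getD s 0 + 1)) tmp)
      PySem.Dict.empty
  tmp.items


-- ===== PRECONDITION & SPEC =====
def Spec_part_sum (lst : List Int) (out : List (Int × Int)) : Prop := out = part_sum_alt lst
instance (lst : List Int) (out : List (Int × Int)) : Decidable (Spec_part_sum lst out) := by unfold Spec_part_sum; infer_instance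

-- ===== CLAIM (what is proved, stated in full; the proofs are below) =====
def Claim_equal_part_sum : Prop := ∀ (lst : List Int), Dom_part_sum lst → Spec_part_sum lst (part_sum lst)

-- ===== LEMMAS AND PROOFS =====

-- running sums t+x1, t+x1+x2, … of xs starting from t
def scanSums (t : Int) : List Int → List Int
  | [] => []
  | x :: xs => (t + x) :: scanSums (t + x) xs

theorem step_eq (d : PySem.Dict Int Int) (t : Int) :
    (if d.contains t then d.insert t (d.getD t 0 + 1) else d.insert t 1)
      = d.insert t (d.getD t 0 + 1) := by
  by_cases h : d.contains t
  · simp [h]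
  · rw [Bool.not_eq_true] at h
    simp [h, PySem.Dict.getD_of_not_contains d (0:Int) h]

theorem stepFun_eq :
    (fun (st : Int × PySem.Dict Int Int) v =>
        (st.1 + v,
          if (st.2).contains (st.1 + v) then (st.2).insert (st.1 + v) ((st.2).getD (st.1 + v) 0 + 1)
          else (st.2).insert (st.1 + v) 1))
      = (fun (st : Int × PySem.Dict Int Int) v =>
          (st.1 + v, (st.2).insert (st.1 + v) ((st.2).getD (st.1 + v) 0 + 1))) := by
  funext st v
  rw [step_eq]

theorem length_scanSums (t : Int) (xs : List Int) : (scanSums t xs).length = xs.length := by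
  induction xs generalizing t with
  | nil => rfl
  | cons x xs ih => simp [scanSums, ih]

theorem scanSums_shift (t c : Int) (xs : List Int) :
    scanSums (t + c) xs = (scanSums t xs).map (· + c) := by
  induction xs generalizing t with
  | nil => rfl
  | cons x xs ih =>
    simp only [scanSums, List.map_cons]
    rw [show t + c + x = t + x + c by ring, ih]

theorem scanSums_drop (t : Int) (xs : List Int) (k : Nat) :
    (scanSums t xs).drop k = scanSums (t + (xs.take k).sum) (xs.drop k) := by
  induction xs generalizing t k with
  | nil => simp [scanSums]
  | cons x xs ih =>
    cases k with
    | zero => simp [scanSums]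
    | succ k => simp [scanSums, ih, add_assoc]

theorem getD_cons_scanSums (t : Int) (xs : List Int) (k : Nat) (hk : k ≤ xs.length) :
    (t :: scanSums t xs).getD k 0 = t + (xs.take k).sum := by
  induction xs generalizing t k with
  | nil => simp [Nat.le_zero.mp hk]
  | cons x xs ih =>
    cases k with
    | zero => simp
    | succ k =>
      simp only [scanSums, List.getD_cons_succ]
      rw [ih (t + x) k (by simpa using hk)]
      simp [add_assoc]

theorem foldP (xs : List Int) (t : Int) (acc : List Int) :
    xs.foldl (fun (st : Int × List Int) x => (st.1 + x, st.2 ++ [st.1 + x])) (t, acc)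
      = (t + xs.sum, acc ++ scanSums t xs) := by
  induction xs generalizing t acc with
  | nil => simp [scanSums]
  | cons x xs ih => simp [scanSums, ih, add_assoc]

theorem foldPairB (xs : List Int) (t : Int) (d : PySem.Dict Int Int) :
    xs.foldl (fun (st : Int × PySem.Dict Int Int) v =>
        (st.1 + v, (st.2).insert (st.1 + v) ((st.2).getD (st.1 + v) 0 + 1))) (t, d)
      = (t + xs.sum,
          (scanSums t xs).foldl (fun d s => d.insert s (d.getD s 0 + 1)) d) := by
  induction xs generalizing t d with
  | nil => simp [scanSums]
  | cons x xs ih => simp [scanSums, ih, add_assoc]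

theorem map_sub_scanSums (c : Int) (xs : List Int) :
    (scanSums c xs).map (· - c) = scanSums 0 xs := by
  have h := scanSums_shift 0 c xs
  rw [zero_add] at h
  rw [h, List.map_map]
  have : ((· - c) ∘ (· + c) : Int → Int) = id := by funext z; simp
  rw [this, List.map_id]

theorem innerA_eq (lst : List Int) (a : Int) (ha : 0 ≤ a) (d : PySem.Dict Int Int) :
    ((PySem.List.pyRange a (PySem.List.len lst) 1).foldl
        (fun (st : Int × PySem.Dict Int Int) i =>
          let total := st.1 + PySem.List.pyGetD lst i 0
          let tmp := st.2
          (total,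
            if tmp.contains total then tmp.insert total (tmp.getD total 0 + 1)
            else tmp.insert total 1))
        ((0 : Int), d)).2
      = (scanSums 0 (lst.drop a.toNat)).foldl (fun d s => d.insert s (d.getD s 0 + 1)) d := by
  rw [PySem.List.foldl_pyRange_pyGetD (a := a) (xs := lst) (d := (0:Int))
    (f := fun (st : Int × PySem.Dict Int Int) v =>
      (st.1 + v,
        if (st.2).contains (st.1 + v) then (st.2).insert (st.1 + v) ((st.2).getD (st.1 + v) 0 + 1)
        else (st.2).insert (st.1 + v) 1)) (init := ((0:Int), d)) ha]
  rw [stepFun_eq, foldPairB]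

theorem part_sum_eq_alt (lst : List Int) : part_sum lst = part_sum_alt lst := by
  unfold part_sum part_sum_alt
  simp only [foldP, List.singleton_append]
  apply congrArg PySem.Dict.items
  apply PySem.List.foldl_congr_mem
  intro d a hmem
  rw [PySem.List.mem_pyRange_one] at hmem
  obtain ⟨ha0, haN⟩ := hmem
  have haN' : a < (lst.length : Int) := by simpa using haN
  have hNat : a.toNat ≤ lst.length := by omega
  rw [innerA_eq lst a ha0 d]
  have hlenP : PySem.List.len lst + 1 = (((0 : Int) :: scanSums 0 lst).length : Int) := by
    simp [length_scanSums]
  rw [hlenP]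
  rw [PySem.List.foldl_pyRange_pyGetD' (a := a + 1) (xs := (0 : Int) :: scanSums 0 lst)
    (d := (0:Int))
    (f := fun (tmp : PySem.Dict Int Int) q =>
      tmp.insert (q - PySem.List.pyGetD ((0 : Int) :: scanSums 0 lst) a 0)
        (tmp.getD (q - PySem.List.pyGetD ((0 : Int) :: scanSums 0 lst) a 0) 0 + 1))
    (init := d) (by omega)]
  have htn : (a + 1).toNat = a.toNat + 1 := by omega
  rw [htn]
  have hPa : PySem.List.pyGetD ((0 : Int) :: scanSums 0 lst) a 0
      = (lst.take a.toNat).sum := by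
    rw [← Int.toNat_of_nonneg ha0, PySem.List.pyGetD_natCast]
    rw [getD_cons_scanSums 0 lst a.toNat hNat]
    simp [show (max a 0).toNat = a.toNat from by omega]
  rw [hPa]
  rw [List.drop_succ_cons, scanSums_drop 0 lst a.toNat, zero_add]
  rw [← List.foldl_map (f := fun q => q - (lst.take a.toNat).sum)
    (g := fun (tmp : PySem.Dict Int Int) s => tmp.insert s (tmp.getD s 0 + 1))]
  rw [map_sub_scanSums]

-- ===== VERDICT (by name: the statement is the Claim_ definition above) =====
theorem part_sum_spec : Claim_equal_part_sum := by
  intro lst _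
  unfold Spec_part_sum
  exact part_sum_eq_alt lst
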